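-- pv_equiv track=rewrite | github.com/Jy1225/JLeakDetector | src/agent/dfbscan.py | __pick_java_mlk_source_key_near_line
-- ===== SOURCE A (Python) =====
-- from typing import Dict, List, Set, Tuple, cast
--
-- def __pick_java_mlk_source_key_near_line(
--
--     candidates: List[Tuple[int, str]],
--     line_number: int,
-- ) -> str:
--     if len(candidates) == 0:
--         return ""
--
--     exact_candidates = [
--         (candidate_line, candidate_key)
--         for candidate_line, candidate_key in candidates
--         if candidate_line == line_number
--     ]
--     if len(exact_candidates) > 0:
--         exact_candidates.sort(key=lambda item: item[1])
--         return exact_candidates[0][1]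
--
--     prior_candidates = [
--         (candidate_line, candidate_key)
--         for candidate_line, candidate_key in candidates
--         if candidate_line <= line_number
--     ]
--     if len(prior_candidates) > 0:
--         prior_candidates.sort(key=lambda item: (-item[0], item[1]))
--         return prior_candidates[0][1]
--
--     post_candidates = sorted(candidates, key=lambda item: (item[0], item[1]))
--     return post_candidates[0][1]
-- ===== SOURCE B (Python) =====
-- def __pick_java_mlk_source_key_near_line(candidates, line_number):
--     # Single linear pass: track best exact key, best prior (max line, min key),
--     # best post (min line, min key); return by priority.
--     exact = None
--     prior = None
--     post = None
--     for l, k in candidates: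
--         if l == line_number:
--             if exact is None or k < exact:
--                 exact = k
--         elif l < line_number:
--             if prior is None or l > prior[0] or (l == prior[0] and k < prior[1]):
--                 prior = (l, k)
--         else:
--             if post is None or l < post[0] or (l == post[0] and k < post[1]):
--                 post = (l, k)
--     if exact is not None:
--         return exact
--     if prior is not None:
--         return prior[1]
--     if post is not None:
--         return post[1]
--     return ""
-- ===== Notes on version B (the rewrite author's own statement) =====
-- stated objective: alternative
-- what changed: Replaced the three filter+sort passes by a single linear pass that tracks the best exact / prior / post candidate under the same tie-break keys.
import Mathlib
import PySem

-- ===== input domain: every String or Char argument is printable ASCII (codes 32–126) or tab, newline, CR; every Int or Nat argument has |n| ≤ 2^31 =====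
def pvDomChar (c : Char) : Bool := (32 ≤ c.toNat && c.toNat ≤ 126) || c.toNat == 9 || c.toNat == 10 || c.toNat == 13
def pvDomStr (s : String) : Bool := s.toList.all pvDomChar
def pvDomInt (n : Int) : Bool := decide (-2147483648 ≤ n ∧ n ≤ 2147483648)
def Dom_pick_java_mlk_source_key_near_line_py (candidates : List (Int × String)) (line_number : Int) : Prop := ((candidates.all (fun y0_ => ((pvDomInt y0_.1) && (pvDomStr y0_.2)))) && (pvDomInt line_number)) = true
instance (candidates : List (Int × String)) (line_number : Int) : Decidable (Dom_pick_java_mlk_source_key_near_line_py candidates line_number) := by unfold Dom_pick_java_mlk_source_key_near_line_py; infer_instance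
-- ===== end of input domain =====

-- B replaces A's three filter+sort passes with one linear pass keeping the best
-- exact / prior / post candidate under the same tie-break keys (objective: alternative).

-- ===== PORT A =====
def pick_java_mlk_source_key_near_line_py (candidates : List (Int × String)) (line_number : Int) : String :=
  if candidates.length == 0 then ""
  else
    let exact_candidates := candidates.filter (fun c => c.1 == line_number)
    if exact_candidates.length > 0 then
      ((PySem.List.sorted exact_candidates (fun it => it.2)).headD (0, "")).2
    else
      let prior_candidates := candidates.filter (fun c => decide (c.1 ≤ line_number))
      if prior_candidates.length > 0 then
        ((PySem.List.sorted2 prior_candidates (fun it => -it.1) (fun it => it.2)).headD (0, "")).2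
      else
        ((PySem.List.sorted2 candidates (fun it => it.1) (fun it => it.2)).headD (0, "")).2

-- ===== PORT B =====
-- the three "update the running best" clauses of Source B's loop body
def pvStepExact (e : Option String) (c : Int × String) : Option String :=
  match e with
  | none => some c.2
  | some k => if c.2 < k then some c.2 else some k

def pvStepPrior (p : Option (Int × String)) (c : Int × String) : Option (Int × String) :=
  match p with
  | none => some c
  | some b => if b.1 < c.1 ∨ (c.1 = b.1 ∧ c.2 < b.2) then some c else some b

def pvStepPost (q : Option (Int × String)) (c : Int × String) : Option (Int × String) :=
  match q with
  | none => some c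
  | some b => if c.1 < b.1 ∨ (c.1 = b.1 ∧ c.2 < b.2) then some c else some b

-- state: (best exact key, best prior (line,key), best post (line,key))
def pick_java_mlk_source_key_near_line_py_alt (candidates : List (Int × String)) (line_number : Int) : String :=
  let st := candidates.foldl
    (fun (s : Option String × Option (Int × String) × Option (Int × String)) c =>
      if c.1 == line_number then (pvStepExact s.1 c, s.2.1, s.2.2)
      else if (!(c.1 == line_number) && decide (c.1 < line_number)) then (s.1, pvStepPrior s.2.1 c, s.2.2)
      else (s.1, s.2.1, pvStepPost s.2.2 c))
    (none, none, none)
  match st.1 with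
  | some e => e
  | none =>
    match st.2.1 with
    | some b => b.2
    | none =>
      match st.2.2 with
      | some b => b.2
      | none => ""

-- ===== PRECONDITION & SPEC =====
def Spec_pick_java_mlk_source_key_near_line_py (candidates : List (Int × String)) (line_number : Int) (out : String) : Prop := out = pick_java_mlk_source_key_near_line_py_alt candidates line_number
instance (candidates : List (Int × String)) (line_number : Int) (out : String) : Decidable (Spec_pick_java_mlk_source_key_near_line_py candidates line_number out) := by unfold Spec_pick_java_mlk_source_key_near_line_py; infer_instance

-- ===== CLAIM (what is proved, stated in full; the proofs are below) =====
def Claim_equal_pick_java_mlk_source_key_near_line_py : Prop := ∀ (candidates : List (Int × String)) (line_number : Int), Dom_pick_java_mlk_source_key_near_line_py candidates line_number → Spec_pick_java_mlk_source_key_near_line_py candidates line_number (pick_java_mlk_source_key_near_line_py candidates line_number)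

-- ===== LEMMAS AND PROOFS =====

-- head of insertBy
theorem head?_insertBy {α : Type} (before : α → α → Bool) (x : α) (ys : List α) :
    (PySem.List.insertBy before x ys).head? =
      some (match ys.head? with
            | none => x
            | some y => if before x y then x else y) := by
  cases ys with
  | nil => simp [PySem.List.insertBy]
  | cons y ys =>
      by_cases h : before x y = true <;> simp [PySem.List.insertBy, h]

-- head of an insertion-sort fold is the "keep first best" linear fold
theorem head?_foldl_insertBy {α : Type} (before : α → α → Bool) :
    ∀ (xs acc : List α) (h : α), acc.head? = some h →
      ((xs.foldl (fun a x => PySem.List.insertBy before x a) acc).head? =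
        some (xs.foldl (fun b x => if before x b then x else b) h)) := by
  intro xs
  induction xs with
  | nil => intro acc h hh; simpa using hh
  | cons x xs ih =>
      intro acc h hh
      simp only [List.foldl_cons]
      apply ih
      rw [head?_insertBy]
      simp [hh]

theorem head_sorted_cons {α κ : Type} [LT κ] [DecidableLT κ] (key : α → κ) (c : α) (rest : List α) :
    (PySem.List.sorted (c :: rest) key).head? =
      some (rest.foldl (fun b x => if decide (key x < key b) then x else b) c) := by
  unfold PySem.List.sorted
  simp only [if_neg (by simp : ¬ (false = true))]
  rw [List.foldl_cons]
  exact head?_foldl_insertBy _ rest (PySem.List.insertBy _ c []) c (by simp [PySem.List.insertBy])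

theorem head_sorted2_cons {α κ₁ κ₂ : Type} [LT κ₁] [DecidableLT κ₁] [LT κ₂] [DecidableLT κ₂]
    (k1 : α → κ₁) (k2 : α → κ₂) (c : α) (rest : List α) :
    (PySem.List.sorted2 (c :: rest) k1 k2).head? =
      some (rest.foldl (fun b x =>
        if (decide (k1 x < k1 b) || !decide (k1 b < k1 x) && decide (k2 x < k2 b)) then x else b) c) := by
  unfold PySem.List.sorted2
  simp only [if_neg (by simp : ¬ (false = true))]
  rw [List.foldl_cons]
  exact head?_foldl_insertBy _ rest (PySem.List.insertBy _ c []) c (by simp [PySem.List.insertBy])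

-- the triple-state fold of B splits into three independent conditional folds
theorem fold3_split (line_number : Int) :
    ∀ (xs : List (Int × String)) (e : Option String) (p q : Option (Int × String)),
      xs.foldl (fun (s : Option String × Option (Int × String) × Option (Int × String)) c =>
          if c.1 == line_number then (pvStepExact s.1 c, s.2.1, s.2.2)
          else if (!(c.1 == line_number) && decide (c.1 < line_number)) then (s.1, pvStepPrior s.2.1 c, s.2.2)
          else (s.1, s.2.1, pvStepPost s.2.2 c)) (e, p, q)
      = (xs.foldl (fun e c => if c.1 == line_number then pvStepExact e c else e) e,
         xs.foldl (fun p c => if (!(c.1 == line_number) && decide (c.1 < line_number)) then pvStepPrior p c else p) p,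
         xs.foldl (fun q c => if (!(c.1 == line_number) && !decide (c.1 < line_number)) then pvStepPost q c else q) q) := by
  intro xs
  induction xs with
  | nil => intro e p q; rfl
  | cons c xs ih =>
      intro e p q
      rw [List.foldl_cons, List.foldl_cons, List.foldl_cons, List.foldl_cons]
      by_cases h1 : c.1 == line_number
      · rw [if_pos h1, if_pos h1, if_neg (by simp [h1]), if_neg (by simp [h1]), ih]
      · by_cases h2 : decide (c.1 < line_number) = true
        · rw [if_neg h1, if_pos (by simp [h1, h2]), if_neg h1, if_pos (by simp [h1, h2]),
            if_neg (by simp [h2]), ih]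
        · rw [if_neg h1, if_neg (by simp [h2]), if_neg h1, if_neg (by simp [h2]),
            if_pos (by simp [h1, h2]), ih]

-- a conditional fold is the fold over the filtered list
theorem foldl_cond_filter {α β : Type} (p : α → Bool) (f : β → α → β) :
    ∀ (xs : List α) (b : β),
      xs.foldl (fun b c => if p c then f b c else b) b = (xs.filter p).foldl f b := by
  intro xs
  induction xs with
  | nil => intro b; rfl
  | cons c xs ih =>
      intro c0
      by_cases h : p c <;> simp [h, ih]

-- Option-accumulator folds, once started, are plain folds
theorem foldl_stepExact :
    ∀ (ys : List (Int × String)) (k : String),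
      ys.foldl pvStepExact (some k) = some (ys.foldl (fun k c => if c.2 < k then c.2 else k) k) := by
  intro ys
  induction ys with
  | nil => intro k; rfl
  | cons y ys ih =>
      intro k
      simp only [List.foldl_cons, pvStepExact]
      by_cases h : y.2 < k
      · rw [if_pos h, if_pos h, ih]
      · rw [if_neg h, if_neg h, ih]

theorem foldl_stepPrior :
    ∀ (ys : List (Int × String)) (b : Int × String),
      ys.foldl pvStepPrior (some b)
        = some (ys.foldl (fun b c => if b.1 < c.1 ∨ (c.1 = b.1 ∧ c.2 < b.2) then c else b) b) := by
  intro ys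
  induction ys with
  | nil => intro b; rfl
  | cons y ys ih =>
      intro b
      simp only [List.foldl_cons, pvStepPrior]
      by_cases h : b.1 < y.1 ∨ (y.1 = b.1 ∧ y.2 < b.2)
      · rw [if_pos h, if_pos h, ih]
      · rw [if_neg h, if_neg h, ih]

theorem foldl_stepPost :
    ∀ (ys : List (Int × String)) (b : Int × String),
      ys.foldl pvStepPost (some b)
        = some (ys.foldl (fun b c => if c.1 < b.1 ∨ (c.1 = b.1 ∧ c.2 < b.2) then c else b) b) := by
  intro ys
  induction ys with
  | nil => intro b; rfl
  | cons y ys ih =>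
      intro b
      simp only [List.foldl_cons, pvStepPost]
      by_cases h : y.1 < b.1 ∨ (y.1 = b.1 ∧ y.2 < b.2)
      · rw [if_pos h, if_pos h, ih]
      · rw [if_neg h, if_neg h, ih]

-- projection through a pair-choosing fold (exact branch: B tracks only the key)
theorem foldl_choose_snd :
    ∀ (ys : List (Int × String)) (c : Int × String),
      (ys.foldl (fun b x => if decide (x.2 < b.2) then x else b) c).2
        = ys.foldl (fun k x => if x.2 < k then x.2 else k) c.2 := by
  intro ys
  induction ys with
  | nil => intro c; rfl
  | cons y ys ih =>
      intro c
      simp only [List.foldl_cons]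
      by_cases h : y.2 < c.2
      · rw [if_pos (decide_eq_true h), if_pos h, ih]
      · rw [if_neg (by simpa using h), if_neg h, ih]

-- A's tuple key (-line, key) chooser = B's prior chooser
theorem prior_chooser_eq (b x : Int × String) :
    (decide ((-x.1 : Int) < -b.1) || !decide ((-b.1 : Int) < -x.1) && decide (x.2 < b.2))
      = decide (b.1 < x.1 ∨ (x.1 = b.1 ∧ x.2 < b.2)) := by
  by_cases h1 : b.1 < x.1
  · simp [h1]
  · by_cases h2 : x.1 = b.1 <;> by_cases h3 : x.2 < b.2 <;>
      simp [h1, h2, h3] <;> omega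

-- A's tuple key (line, key) chooser = B's post chooser
theorem post_chooser_eq (b x : Int × String) :
    (decide (x.1 < b.1) || !decide (b.1 < x.1) && decide (x.2 < b.2))
      = decide (x.1 < b.1 ∨ (x.1 = b.1 ∧ x.2 < b.2)) := by
  by_cases h1 : x.1 < b.1
  · simp [h1]
  · by_cases h2 : x.1 = b.1 <;> by_cases h3 : x.2 < b.2 <;>
      simp [h1, h2, h3] <;> omega

-- ===== VERDICT (by name: the statement is the Claim_ definition above) =====
set_option maxHeartbeats 1000000 in
theorem pick_java_mlk_source_key_near_line_py_spec : Claim_equal_pick_java_mlk_source_key_near_line_py := by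
  intro candidates line_number _hdom
  unfold Spec_pick_java_mlk_source_key_near_line_py
  simp only [pick_java_mlk_source_key_near_line_py, pick_java_mlk_source_key_near_line_py_alt]
  rw [fold3_split]
  rw [foldl_cond_filter (fun c => c.1 == line_number) pvStepExact candidates none,
      foldl_cond_filter (fun c => (!(c.1 == line_number) && decide (c.1 < line_number))) pvStepPrior candidates none,
      foldl_cond_filter (fun c => (!(c.1 == line_number) && !decide (c.1 < line_number))) pvStepPost candidates none]
  cases candidates with
  | nil => rfl
  | cons c0 cs =>
    rw [if_neg (by simp)]
    cases hE : List.filter (fun c => c.1 == line_number) (c0 :: cs) with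
    | cons e0 erest =>
        rw [if_pos (by simp)]
        have hA : (PySem.List.sorted (e0 :: erest) (fun it => it.2)).headD ((0:Int), "") =
            erest.foldl (fun b x => if decide (x.2 < b.2) then x else b) e0 := by
          rw [List.headD_eq_head?_getD, head_sorted_cons]; rfl
        rw [hA]
        have hB : List.foldl pvStepExact none (e0 :: erest) =
            some (erest.foldl (fun k c => if c.2 < k then c.2 else k) e0.2) := by
          rw [List.foldl_cons]
          exact foldl_stepExact erest e0.2
        rw [hB]
        exact foldl_choose_snd erest e0
    | nil =>
        rw [if_neg (by simp)]
        have hne : ∀ x ∈ (c0 :: cs), ¬ x.1 = line_number := by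
          intro x hx
          have := List.filter_eq_nil_iff.mp hE x hx
          simpa using this
        cases hP : List.filter (fun c => decide (c.1 ≤ line_number)) (c0 :: cs) with
        | cons p0 prest =>
            rw [if_pos (by simp)]
            have hPP : List.filter (fun c => (!(c.1 == line_number) && decide (c.1 < line_number))) (c0 :: cs)
                = p0 :: prest := by
              rw [← hP]
              apply List.filter_congr
              intro x hx
              have h1 : x.1 ≠ line_number := hne x hx
              by_cases h2 : x.1 < line_number
              · have h3 : x.1 ≤ line_number := le_of_lt h2
                simp [h1, h2, h3]
              · have h3 : ¬ x.1 ≤ line_number := by omega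
                simp [h1, h2, h3]
            rw [hPP]
            have hA : (PySem.List.sorted2 (p0 :: prest) (fun it => -it.1) (fun it => it.2)).headD ((0:Int), "") =
                prest.foldl (fun b x => if b.1 < x.1 ∨ (x.1 = b.1 ∧ x.2 < b.2) then x else b) p0 := by
              rw [List.headD_eq_head?_getD, head_sorted2_cons]
              simp only [prior_chooser_eq, decide_eq_true_eq]
              rfl
            rw [hA]
            have hB : List.foldl pvStepPrior none (p0 :: prest) =
                some (prest.foldl (fun b c => if b.1 < c.1 ∨ (c.1 = b.1 ∧ c.2 < b.2) then c else b) p0) := by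
              rw [List.foldl_cons]
              exact foldl_stepPrior prest p0
            rw [hB]
            rfl
        | nil =>
            rw [if_neg (by simp)]
            have hgt : ∀ x ∈ (c0 :: cs), ¬ x.1 ≤ line_number := by
              intro x hx
              have := List.filter_eq_nil_iff.mp hP x hx
              simpa using this
            have hPP : List.filter (fun c => (!(c.1 == line_number) && decide (c.1 < line_number))) (c0 :: cs)
                = [] := by
              apply List.filter_eq_nil_iff.mpr
              intro x hx
              have := hgt x hx
              simp only [Bool.and_eq_true, Bool.not_eq_true', beq_eq_false_iff_ne, ne_eq,
                decide_eq_true_eq, not_and]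
              intro _ h
              omega
            have hQQ : List.filter (fun c => (!(c.1 == line_number) && !decide (c.1 < line_number))) (c0 :: cs)
                = c0 :: cs := by
              apply List.filter_eq_self.mpr
              intro x hx
              have := hgt x hx
              simp only [Bool.and_eq_true, Bool.not_eq_true', beq_eq_false_iff_ne, ne_eq,
                decide_eq_false_iff_not]
              constructor
              · omega
              · omega
            rw [hPP, hQQ]
            have hA : (PySem.List.sorted2 (c0 :: cs) (fun it => it.1) (fun it => it.2)).headD ((0:Int), "") =
                cs.foldl (fun b x => if x.1 < b.1 ∨ (x.1 = b.1 ∧ x.2 < b.2) then x else b) c0 := by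
              rw [List.headD_eq_head?_getD, head_sorted2_cons]
              simp only [post_chooser_eq, decide_eq_true_eq]
              rfl
            rw [hA]
            have hB : List.foldl pvStepPost none (c0 :: cs) =
                some (cs.foldl (fun b c => if c.1 < b.1 ∨ (c.1 = b.1 ∧ c.2 < b.2) then c else b) c0) := by
              rw [List.foldl_cons]
              exact foldl_stepPost cs c0
            rw [hB]
            rfl
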